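-- pv_equiv track=rewrite | github.com/alikhan37544/NNML-SRM | Experiment_3_Candidat_Elimination.py | specialize_hypothesis
-- ===== SOURCE A (Python) =====
-- def specialize_hypothesis(general_hypotheses, sample, domain):
--     """Specialize the general hypotheses minimally so that they exclude the sample."""
--     new_general_hypotheses = []
--     for hypothesis in general_hypotheses:
--         for i in range(len(hypothesis)):
--             if hypothesis[i] == '?':
--                 for value in domain[i]:
--                     if sample[i] != value:
--                         new_hypothesis = hypothesis.copy()
--                         new_hypothesis[i] = value
--                         new_general_hypotheses.append(new_hypothesis)
--             elif hypothesis[i] != sample[i]: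
--                 new_general_hypotheses.append(hypothesis)
--                 break
--     return new_general_hypotheses
-- ===== SOURCE B (Python) =====
-- def _specialize_suffix(h, s, d):
--     """Recurse on the structure of the suffix; return (specialized suffixes, hypothesis-excludes-sample flag)."""
--     if not h:
--         return [], False
--     c, rest = h[0], h[1:]
--     if c == '?':
--         sv, dv = s[0], d[0]
--         tails, flag = _specialize_suffix(rest, s[1:], d[1:])
--         return [[v] + rest for v in dv if sv != v] + [[c] + t for t in tails], flag
--     if c != s[0]:
--         return [], True
--     tails, flag = _specialize_suffix(rest, s[1:], d[1:])
--     return [[c] + t for t in tails], flag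
--
--
-- def specialize_hypothesis(general_hypotheses, sample, domain):
--     """Specialize the general hypotheses minimally so that they exclude the sample."""
--     result = []
--     for hypothesis in general_hypotheses:
--         tails, excludes = _specialize_suffix(hypothesis, sample, domain)
--         result.extend(tails)
--         if excludes:
--             result.append(hypothesis)
--     return result
-- ===== Notes on version B (the rewrite author's own statement) =====
-- stated objective: alternative
-- what changed: Replaces A's index loop with copy-and-set by a structural recursion that consumes hypothesis, sample and domain together, returning specialized suffixes plus a survival flag and rebuilding each specialization by list construction (cons) as the recursion unwinds.
-- outside the precondition, e.g. on specialize_hypothesis([['a', '?']], ['a'], [[], []]): A returns [], B raises IndexError; on specialize_hypothesis([['a', 'b']], ['c'], []): A returns [['a', 'b']], B returns [['a', 'b']]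
import Mathlib
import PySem

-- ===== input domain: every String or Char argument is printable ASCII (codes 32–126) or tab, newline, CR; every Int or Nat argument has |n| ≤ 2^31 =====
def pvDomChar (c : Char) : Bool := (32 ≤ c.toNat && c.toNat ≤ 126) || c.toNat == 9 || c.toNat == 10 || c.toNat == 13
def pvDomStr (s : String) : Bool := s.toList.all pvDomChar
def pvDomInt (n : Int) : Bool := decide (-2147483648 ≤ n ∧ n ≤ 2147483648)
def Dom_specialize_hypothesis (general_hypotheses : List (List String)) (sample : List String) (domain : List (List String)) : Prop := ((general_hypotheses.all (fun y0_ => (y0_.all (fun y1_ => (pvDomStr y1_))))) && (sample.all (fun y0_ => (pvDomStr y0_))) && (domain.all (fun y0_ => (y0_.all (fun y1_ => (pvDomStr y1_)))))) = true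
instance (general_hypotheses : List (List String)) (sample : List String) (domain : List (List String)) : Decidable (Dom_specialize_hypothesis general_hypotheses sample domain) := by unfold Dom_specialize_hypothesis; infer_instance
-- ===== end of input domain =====

-- B re-implements A by structural recursion over the hypothesis/sample/domain lists, rebuilding specializations by cons instead of an index loop with copy-and-set; alternative structure, same cost.


-- ===== PORT A =====
-- inner 'for i in range(len(hypothesis))' with break: structural recursion over the
-- suffix of the hypothesis, carrying the index i; 'full' is the whole hypothesis
-- (for .copy()/[i]=value and for the break-append).
def pvLoopA (sample : List String) (domain : List (List String)) (full : List String) : Nat → List String → List (List String)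
  | _, [] => []
  | i, c :: rest =>
    if c = "?" then
      (((domain.getD i []).filter (fun v => sample.getD i "" ≠ v)).map (fun v => full.set i v))
        ++ pvLoopA sample domain full (i + 1) rest
    else if c ≠ sample.getD i "" then [full]
    else pvLoopA sample domain full (i + 1) rest

def specialize_hypothesis (general_hypotheses : List (List String)) (sample : List String) (domain : List (List String)) : List (List String) :=
  general_hypotheses.foldl (fun acc hypothesis => acc ++ pvLoopA sample domain hypothesis 0 hypothesis) []

-- ===== PORT B =====
-- _specialize_suffix: recursion on the structure of the three lists together, returning
-- (specialized suffixes, hypothesis-excludes-sample flag); the last catch-all arm is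
-- unreachable under Pre_ (Python B raises IndexError there).
def pvGo : List String → List String → List (List String) → List (List String) × Bool
  | [], _, _ => ([], false)
  | c :: rest, s, d =>
    if c = "?" then
      match s, d with
      | sv :: _, dv :: _ =>
        let r := pvGo rest s.tail d.tail
        ((dv.filter (fun v => sv ≠ v)).map (fun v => v :: rest) ++ r.1.map (fun t => c :: t), r.2)
      | _, _ => ([], false)   -- Python B raises IndexError here (outside Pre_)
    else
      match s with
      | sv :: _ =>
        if c ≠ sv then ([], true)
        else
          let r := pvGo rest s.tail d.tail
          (r.1.map (fun t => c :: t), r.2)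
      | [] => ([], false)     -- Python B raises IndexError here (outside Pre_)

def specialize_hypothesis_alt (general_hypotheses : List (List String)) (sample : List String) (domain : List (List String)) : List (List String) :=
  general_hypotheses.foldl (fun acc hypothesis =>
    let r := pvGo hypothesis sample domain
    (acc ++ r.1) ++ (if r.2 then [hypothesis] else [])) []

-- ===== PRECONDITION & SPEC =====
-- Pre_ requires sample and domain to cover every hypothesis's positions; outside it the
-- programs usually raise IndexError, though on some corners (an early break, or a '?'
-- over an empty domain list) one or both still return — excluded examples in cites.
def Pre_specialize_hypothesis (general_hypotheses : List (List String)) (sample : List String) (domain : List (List String)) : Prop :=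
  ∀ h ∈ general_hypotheses, h.length ≤ sample.length ∧ h.length ≤ domain.length
instance (general_hypotheses : List (List String)) (sample : List String) (domain : List (List String)) : Decidable (Pre_specialize_hypothesis general_hypotheses sample domain) := by unfold Pre_specialize_hypothesis; infer_instance

def pvWitness_specialize_hypothesis : List (List String) × List String × List (List String) :=
  ([["?", "a"], ["b", "?"]], ["a", "b"], [["a", "b"], ["a", "b"]])

def Spec_specialize_hypothesis (general_hypotheses : List (List String)) (sample : List String) (domain : List (List String)) (out : List (List String)) : Prop := out = specialize_hypothesis_alt general_hypotheses sample domain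
instance (general_hypotheses : List (List String)) (sample : List String) (domain : List (List String)) (out : List (List String)) : Decidable (Spec_specialize_hypothesis general_hypotheses sample domain out) := by unfold Spec_specialize_hypothesis; infer_instance

-- ===== CLAIM (what is proved, stated in full; the proofs are below) =====
def Claim_equal_specialize_hypothesis : Prop := ∀ (general_hypotheses : List (List String)) (sample : List String) (domain : List (List String)), Dom_specialize_hypothesis general_hypotheses sample domain → Pre_specialize_hypothesis general_hypotheses sample domain → Spec_specialize_hypothesis general_hypotheses sample domain (specialize_hypothesis general_hypotheses sample domain)

-- ===== LEMMAS AND PROOFS =====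

-- A's index loop over the suffix equals B's structural recursion with the prefix re-attached.
theorem pvLoop_eq_go (sample : List String) (domain : List (List String)) (full : List String)
    (hs : full.length ≤ sample.length) (hd : full.length ≤ domain.length) :
    ∀ (rest : List String) (i : Nat), full.drop i = rest →
    pvLoopA sample domain full i rest =
      (pvGo rest (sample.drop i) (domain.drop i)).1.map (fun t => full.take i ++ t)
      ++ (if (pvGo rest (sample.drop i) (domain.drop i)).2 then [full] else []) := by
  intro rest
  induction rest with
  | nil => intro i _; simp [pvLoopA, pvGo]
  | cons c t ih =>
    intro i hdrop
    have hi : i < full.length := by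
      have := congrArg List.length hdrop; simp at this; omega
    have his : i < sample.length := lt_of_lt_of_le hi hs
    have hid : i < domain.length := lt_of_lt_of_le hi hd
    have hsd : sample.drop i = sample[i] :: sample.drop (i + 1) :=
      List.drop_eq_getElem_cons his
    have hdd : domain.drop i = domain[i] :: domain.drop (i + 1) :=
      List.drop_eq_getElem_cons hid
    have hfd : full.drop (i + 1) = t := by
      have := congrArg List.tail hdrop
      simpa [List.tail_drop] using this
    have hgetc : full.getD i "" = c := by
      have h0 : (full.drop i)[0]? = full[i]? := by simp [List.getElem?_drop]
      rw [hdrop] at h0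
      simp [List.getD, ← h0]
    have hgets : sample.getD i "" = sample[i] := by
      simp [List.getD, List.getElem?_eq_getElem his]
    have hgetd : domain.getD i [] = domain[i] := by
      simp [List.getD, List.getElem?_eq_getElem hid]
    have hset : ∀ v : String, full.set i v = full.take i ++ v :: t := by
      intro v
      rw [List.set_eq_take_append_cons_drop, if_pos hi, hfd]
    have htake : full.take (i + 1) = full.take i ++ [c] := by
      rw [List.take_add_one, List.getElem?_eq_getElem hi]
      have : full[i] = c := by
        have h0 : (full.drop i)[0]? = full[i]? := by simp [List.getElem?_drop]
        rw [hdrop] at h0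
        simp at h0
        simp [List.getElem?_eq_getElem hi] at h0
        exact h0.symm
      simp [this]
    rw [hsd, hdd]
    simp only [pvLoopA, pvGo]
    by_cases hq : c = "?"
    · rw [if_pos hq, if_pos hq, hgetd, hgets, ih (i + 1) hfd]
      simp only [List.map_append, List.map_map, Function.comp_def, List.append_assoc]
      congr 1
      · apply List.map_congr_left; intro v _; exact hset v
      · congr 1
        apply List.map_congr_left; intro tl _
        rw [htake]; simp
    · rw [if_neg hq, if_neg hq]
      by_cases hm : c ≠ sample[i]
      · rw [if_pos (by rw [hgets]; exact hm), if_pos hm]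
        simp
      · simp at hm
        rw [if_neg (by rw [hgets]; simpa using hm), if_neg (by simpa using hm)]
        rw [ih (i + 1) hfd]
        congr 1
        simp only [List.map_map, Function.comp_def]
        apply List.map_congr_left; intro tl _
        rw [htake]; simp

theorem pvPerHyp (sample : List String) (domain : List (List String)) (h : List String)
    (hs : h.length ≤ sample.length) (hd : h.length ≤ domain.length) :
    pvLoopA sample domain h 0 h =
      (pvGo h sample domain).1 ++ (if (pvGo h sample domain).2 then [h] else []) := by
  have := pvLoop_eq_go sample domain h hs hd h 0 (by simp)
  simpa using this

-- ===== VERDICT (by name: the statement is the Claim_ definition above) =====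
theorem specialize_hypothesis_spec : Claim_equal_specialize_hypothesis := by
  intro gh sample domain _ hpre
  unfold Spec_specialize_hypothesis specialize_hypothesis specialize_hypothesis_alt
  refine PySem.List.foldl_congr_mem _ _ _ _ ?_
  intro acc h hmem
  obtain ⟨hs, hd⟩ := hpre h hmem
  show acc ++ pvLoopA sample domain h 0 h =
    (acc ++ (pvGo h sample domain).1) ++ (if (pvGo h sample domain).2 then [h] else [])
  rw [pvPerHyp sample domain h hs hd, List.append_assoc]
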